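-- pv_equiv track=rewrite | github.com/AllanKoder/Competitive-Programming-Training | codeforces-practice/1600s/spreadsheets.py | is_rc
-- ===== SOURCE A (Python) =====
-- def is_rc(string: str) -> bool:
--     switches = 0
--     is_number = False
--     for c in string:
--         if is_number != c.isalpha():
--             is_number = c.isalpha()
--             switches += 1
--     return switches == 4
-- ===== SOURCE B (Python) =====
-- def _shape(s: str, alpha: bool, runs: int) -> bool:
--     # recursive-descent recognizer: consume one maximal run of chars whose
--     # isalpha() equals `alpha`, then recurse with the opposite class
--     if runs == 0:
--         return s == ""
--     i = 0
--     while i < len(s) and s[i].isalpha() == alpha: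
--         i += 1
--     return i > 0 and _shape(s[i:], not alpha, runs - 1)
--
-- def is_rc(string: str) -> bool:
--     # exactly 4 switches from the implicit leading non-letter state means the
--     # string is either 4 alternating runs starting with letters, or 5 starting without
--     return _shape(string, True, 4) or _shape(string, False, 5)
-- ===== Notes on version B (the rewrite author's own statement) =====
-- stated objective: alternative
-- what changed: B replaces A's single-pass switch counter with a recursive-descent recognizer that tries to parse the string as one of two exact alternating run shapes (4 runs starting with letters, or 5 runs starting with non-letters).
import Mathlib
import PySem

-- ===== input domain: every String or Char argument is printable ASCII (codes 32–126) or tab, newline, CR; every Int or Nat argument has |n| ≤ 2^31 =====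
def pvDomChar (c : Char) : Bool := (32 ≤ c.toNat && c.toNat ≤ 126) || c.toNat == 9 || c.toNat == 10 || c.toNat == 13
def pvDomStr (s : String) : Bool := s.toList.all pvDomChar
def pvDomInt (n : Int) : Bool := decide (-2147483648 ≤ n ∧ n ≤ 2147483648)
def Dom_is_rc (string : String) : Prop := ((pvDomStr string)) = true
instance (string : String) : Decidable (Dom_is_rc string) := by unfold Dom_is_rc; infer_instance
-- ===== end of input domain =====

-- B is a recursive-descent recognizer of the two exact alternating run shapes instead of A's switch counter; alternative decomposition, same cost.
-- ===== PORT A =====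
-- switches/is_number loop over the characters, transliterated as a foldl over (switches, is_number)
def is_rc (string : String) : Bool :=
  let st := string.toList.foldl
    (fun (st : Int × Bool) c =>
      if st.2 != PySem.Chars.isalpha c then (st.1 + 1, PySem.Chars.isalpha c) else st)
    (0, false)
  st.1 == 4

-- ===== PORT B =====
-- the while loop of _shape: consume the maximal leading run with isalpha = alpha,
-- returning (number of chars consumed, remaining suffix) — i.e. (i, s[i:])
def eatRun (alpha : Bool) : List Char → Nat × List Char
  | [] => (0, [])
  | c :: cs =>
      if PySem.Chars.isalpha c = alpha then
        let p := eatRun alpha cs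
        (p.1 + 1, p.2)
      else (0, c :: cs)

-- _shape(s, alpha, runs)
def shapeB (alpha : Bool) (runs : Nat) (cs : List Char) : Bool :=
  match runs with
  | 0 => cs.isEmpty
  | r + 1 =>
      let p := eatRun alpha cs
      decide (0 < p.1) && shapeB (!alpha) r p.2

def is_rc_alt (string : String) : Bool :=
  shapeB true 4 string.toList || shapeB false 5 string.toList

-- ===== PRECONDITION & SPEC =====
def Spec_is_rc (string : String) (out : Bool) : Prop := out = is_rc_alt string
instance (string : String) (out : Bool) : Decidable (Spec_is_rc string out) := by unfold Spec_is_rc; infer_instance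

-- ===== CLAIM (what is proved, stated in full; the proofs are below) =====
def Claim_equal_is_rc : Prop := ∀ (string : String), Dom_is_rc string → Spec_is_rc string (is_rc string)

-- ===== LEMMAS AND PROOFS =====
-- count of switches of A's loop starting from state b
def countSwitches (b : Bool) : List Char → Int
  | [] => 0
  | c :: cs => if PySem.Chars.isalpha c = b then countSwitches b cs
               else 1 + countSwitches (PySem.Chars.isalpha c) cs

theorem foldl_eq_countSwitches (cs : List Char) (s : Int) (b : Bool) :
    (cs.foldl (fun (st : Int × Bool) c =>
      if st.2 != PySem.Chars.isalpha c then (st.1 + 1, PySem.Chars.isalpha c) else st) (s, b)).1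
      = s + countSwitches b cs := by
  induction cs generalizing s b with
  | nil => simp [countSwitches]
  | cons c cs ih =>
    rw [List.foldl_cons, countSwitches]
    by_cases h : PySem.Chars.isalpha c = b
    · have hb : (b != PySem.Chars.isalpha c) = false := by simp [h]
      simp only [hb, Bool.false_eq_true, if_false, if_pos h, ih]
    · have hb : (b != PySem.Chars.isalpha c) = true := by
        cases b <;> cases hc : PySem.Chars.isalpha c <;> simp_all
      simp only [hb, if_true, if_neg h, ih]
      omega

theorem countSwitches_nonneg (b : Bool) (cs : List Char) : (0:Int) ≤ countSwitches b cs := by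
  induction cs generalizing b with
  | nil => simp [countSwitches]
  | cons c cs ih =>
    rw [countSwitches]
    split
    · exact ih b
    · have := ih (PySem.Chars.isalpha c); omega

theorem head_eatRun (b : Bool) (cs : List Char) (c : Char) (d : List Char)
    (h : (eatRun b cs).2 = c :: d) : PySem.Chars.isalpha c = !b := by
  induction cs with
  | nil => simp [eatRun] at h
  | cons c' cs ih =>
    rw [eatRun] at h
    by_cases hc : PySem.Chars.isalpha c' = b
    · rw [if_pos hc] at h; exact ih h
    · rw [if_neg hc] at h
      injection h with h1 _
      subst h1
      cases b <;> simp_all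

theorem count_eat (b : Bool) (cs : List Char) :
    countSwitches b cs =
      if (eatRun b cs).2 = [] then 0 else 1 + countSwitches (!b) (eatRun b cs).2 := by
  induction cs with
  | nil => simp [eatRun, countSwitches]
  | cons c cs ih =>
    rw [countSwitches, eatRun]
    by_cases hc : PySem.Chars.isalpha c = b
    · rw [if_pos hc, if_pos hc]; exact ih
    · rw [if_neg hc, if_neg hc]
      have hcb : PySem.Chars.isalpha c = !b := by
        cases b <;> cases h : PySem.Chars.isalpha c <;> simp_all
      simp [countSwitches, hcb]

theorem eat_pos (b : Bool) (c : Char) (cs : List Char) :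
    (0 < (eatRun b (c :: cs)).1) ↔ PySem.Chars.isalpha c = b := by
  rw [eatRun]
  by_cases hc : PySem.Chars.isalpha c = b
  · rw [if_pos hc]; simpa using hc
  · rw [if_neg hc]; simpa using hc

theorem shapeB_iff (k : Nat) (b : Bool) (cs : List Char) :
    shapeB b k cs = true ↔
      ((k = 0 ∧ cs = []) ∨
       (1 ≤ k ∧ ∃ c d, cs = c :: d ∧ PySem.Chars.isalpha c = b ∧
          countSwitches b cs = (k : Int) - 1)) := by
  induction k generalizing b cs with
  | zero =>
    cases cs <;> simp [shapeB]
  | succ k ih =>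
    cases cs with
    | nil =>
      simp [shapeB, eatRun]
    | cons c cs' =>
      rw [shapeB]
      simp only [Bool.and_eq_true, decide_eq_true_eq, eat_pos]
      by_cases hc : PySem.Chars.isalpha c = b
      · have hrest : (eatRun b (c :: cs')).2 = (eatRun b cs').2 := by
          rw [eatRun, if_pos hc]
        have hcount : countSwitches b (c :: cs') =
            if (eatRun b cs').2 = [] then 0 else 1 + countSwitches (!b) (eatRun b cs').2 := by
          rw [count_eat, hrest]
        rw [hrest, ih]
        constructor
        · rintro ⟨-, hsh⟩
          refine Or.inr ⟨by omega, c, cs', rfl, hc, ?_⟩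
          rcases hsh with ⟨hk0, hnil⟩ | ⟨hk1, c0, d, hd, -, hcnt⟩
          · rw [if_pos hnil] at hcount; omega
          · rw [hd] at hcount
            simp only [reduceCtorEq, if_false] at hcount
            rw [← hd] at hcount
            omega
        · rintro (⟨h0, -⟩ | ⟨-, c0, d, heq, -, hcnt⟩)
          · omega
          refine ⟨hc, ?_⟩
          by_cases hnil : (eatRun b cs').2 = []
          · rw [if_pos hnil] at hcount
            exact Or.inl ⟨by omega, hnil⟩
          · rw [if_neg hnil] at hcount
            rcases hd : (eatRun b cs').2 with _ | ⟨c1, d1⟩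
            · exact absurd hd hnil
            have hhead := head_eatRun b (c :: cs') c1 d1 (by rw [hrest, hd])
            have hnn := countSwitches_nonneg (!b) (c1 :: d1)
            rw [hd] at hcount
            exact Or.inr ⟨by omega, c1, d1, rfl, hhead, by omega⟩
      · constructor
        · rintro ⟨h, -⟩; exact absurd h hc
        · rintro (⟨h0', -⟩ | ⟨-, c0, d, heq, halpha, -⟩)
          · omega
          · injection heq with h1 _
            exact absurd (show PySem.Chars.isalpha c = b by rw [h1]; exact halpha) hc

-- ===== VERDICT (by name: the statement is the Claim_ definition above) =====
theorem is_rc_spec : Claim_equal_is_rc := by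
  intro s _hdom
  unfold Spec_is_rc is_rc is_rc_alt
  simp only [foldl_eq_countSwitches, zero_add]
  rw [Bool.eq_iff_iff, Bool.or_eq_true, shapeB_iff, shapeB_iff, beq_iff_eq]
  cases cs : s.toList with
  | nil => simp [countSwitches]
  | cons c rest =>
    by_cases hc : PySem.Chars.isalpha c = true
    · have hrel : countSwitches false (c :: rest) = 1 + countSwitches true (c :: rest) := by
        rw [countSwitches]
        rw [if_neg (by simp [hc]), hc]
        rw [countSwitches, if_pos hc]
      constructor
      · intro h4
        exact Or.inl (Or.inr ⟨by omega, c, rest, rfl, hc, by omega⟩)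
      · rintro ((⟨h0, h⟩ | ⟨-, c0, d, heq, -, hcnt⟩) | (⟨-, h⟩ | ⟨-, c0, d, heq, halpha, -⟩))
        · exact absurd h (by simp)
        · omega
        · exact absurd h (by simp)
        · injection heq with h1 _; subst h1; simp [hc] at halpha
    · have hc' : PySem.Chars.isalpha c = false := by simpa using hc
      constructor
      · intro h4
        exact Or.inr (Or.inr ⟨by omega, c, rest, rfl, hc', by omega⟩)
      · rintro ((⟨h0, h⟩ | ⟨-, c0, d, heq, halpha, -⟩) | (⟨-, h⟩ | ⟨-, c0, d, heq, -, hcnt⟩))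
        · exact absurd h (by simp)
        · injection heq with h1 _; subst h1; simp [hc'] at halpha
        · exact absurd h (by simp)
        · omega
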